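-- pv_equiv track=rewrite | github.com/pypi-data/pypi-mirror-279 | packages/p-vs-np-library/p_vs_np_library-0.1-py3-none-any.whl/p_vs_np/graph_theory/induced_path.py | induced_path
-- ===== SOURCE A (Python) =====
-- def dfs(graph, vertex, visited, path):
--     visited.add(vertex)
--     path.append(vertex)
--     for neighbor in graph[vertex]:
--         if neighbor not in visited:
--             dfs(graph, neighbor, visited, path)
--
-- def induced_path(graph):
--     longest_path = []
--     for vertex in graph:
--         visited = set()
--         path = []
--         dfs(graph, vertex, visited, path)
--         if len(path) > len(longest_path):
--             longest_path = path
--     return longest_path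
-- ===== SOURCE B (Python) =====
-- def induced_path(graph):
--     paths = []
--     for start in graph:
--         order = []
--         stack = [start]
--         while stack:
--             node = stack.pop()
--             if node not in order:
--                 order.append(node)
--                 stack.extend(reversed(graph[node]))
--         paths.append(order)
--     return max(paths, key=len, default=[])
-- ===== Notes on version B (the rewrite author's own statement) =====
-- stated objective: alternative
-- what changed: B replaces the recursive dfs helper by an inline iterative stack traversal whose growing path list doubles as the visited structure (no set), collects one path per start vertex, and selects the result with Python max keyed by length (first maximum, matching A's strict tie-break) instead of a running comparison accumulator; Pre_ excludes inputs where a listed neighbor is not a key (Python raises KeyError in both) and duplicate keys, which cannot arise from a Python dict.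
import Mathlib
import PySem

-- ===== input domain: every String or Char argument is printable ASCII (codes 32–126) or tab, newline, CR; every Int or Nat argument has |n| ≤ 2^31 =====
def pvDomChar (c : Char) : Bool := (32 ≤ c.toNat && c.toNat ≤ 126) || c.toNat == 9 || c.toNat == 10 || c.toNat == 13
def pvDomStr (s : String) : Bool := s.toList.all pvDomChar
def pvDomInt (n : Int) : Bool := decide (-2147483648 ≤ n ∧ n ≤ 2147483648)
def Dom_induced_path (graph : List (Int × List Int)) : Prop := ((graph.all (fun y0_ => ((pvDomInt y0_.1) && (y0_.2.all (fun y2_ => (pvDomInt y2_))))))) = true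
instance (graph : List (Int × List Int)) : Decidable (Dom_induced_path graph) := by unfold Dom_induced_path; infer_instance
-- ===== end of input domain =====

-- B replaces the recursive dfs by an inline iterative stack loop whose path list doubles as
-- the visited structure, and picks the answer with max(paths, key=len, default=[]).

-- fuel for the traversal recursions: enough for every admitted input (totality device only)
def pvDeg (g : List (Int × List Int)) : Nat := (g.map (fun p => p.2.length)).foldl max 0
def pvFuel (g : List (Int × List Int)) : Nat :=
  (g.map Prod.fst ++ (g.map Prod.snd).flatten).dedup.length * (pvDeg g + 1) + 1

-- ===== PORT A =====
-- graph[v]: first matching entry; [] where Python raises KeyError (those inputs are outside Pre_)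
def pvNbrs (g : List (Int × List Int)) (v : Int) : List Int :=
  match g.find? (fun p => p.1 == v) with
  | some p => p.2
  | none => []

-- dfs(graph, vertex, visited, path): mutates (visited, path); here state-passing, fuel-bounded
def dfsA (g : List (Int × List Int)) : Nat → Int → PySem.Set Int × List Int → PySem.Set Int × List Int
  | 0, _, s => s
  | f+1, v, s =>
    (pvNbrs g v).foldl
      (fun s n => if n ∈ s.1 then s else dfsA g f n s)
      (PySem.Set.add s.1 v, s.2 ++ [v])

def induced_path (graph : List (Int × List Int)) : List Int :=
  (graph.map Prod.fst).foldl
    (fun longest_path vertex =>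
      let st := dfsA graph (pvFuel graph) vertex (PySem.Set.empty, [])
      if longest_path.length < st.2.length then st.2 else longest_path)
    []

-- ===== PORT B =====
-- graph[node] through the Dict view; [] only where Python raises KeyError (outside Pre_)
def nbrsB (g : List (Int × List Int)) (v : Int) : List Int :=
  ((PySem.Dict.mk g).get? v).getD []

-- the while loop: pop, test membership against the path itself, extend with reversed neighbors
-- (head of the list = top of the Python stack, so the extend is a prepend of the neighbor list)
def loopB (g : List (Int × List Int)) : Nat → List Int → List Int → List Int
  | 0, _, order => order
  | _+1, [], order => order
  | f+1, node :: stack, order =>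
    if node ∈ order then loopB g f stack order
    else loopB g f (nbrsB g node ++ stack) (order ++ [node])

def induced_path_alt (graph : List (Int × List Int)) : List Int :=
  let paths := (PySem.Dict.mk graph).keys.map (fun start => loopB graph (pvFuel graph) [start] [])
  (PySem.List.max? paths (fun p => p.length)).getD []

-- ===== PRECONDITION & SPEC =====
-- Pre_ excludes (a) neighbors that are not keys, on which Python A (and B) raise KeyError,
-- and (b) duplicate keys, which cannot arise from a Python dict argument.
def Pre_induced_path (graph : List (Int × List Int)) : Prop :=
  (graph.map Prod.fst).Nodup ∧ ∀ p ∈ graph, ∀ n ∈ p.2, n ∈ graph.map Prod.fst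
instance (graph : List (Int × List Int)) : Decidable (Pre_induced_path graph) := by
  unfold Pre_induced_path; infer_instance

def pvWitness_induced_path : (List (Int × List Int)) := [(0, [1]), (1, [0, 2]), (2, [])]

def Spec_induced_path (graph : List (Int × List Int)) (out : List Int) : Prop := out = induced_path_alt graph
instance (graph : List (Int × List Int)) (out : List Int) : Decidable (Spec_induced_path graph out) := by unfold Spec_induced_path; infer_instance

-- ===== CLAIM (what is proved, stated in full; the proofs are below) =====
def Claim_equal_induced_path : Prop := ∀ (graph : List (Int × List Int)), Dom_induced_path graph → Pre_induced_path graph → Spec_induced_path graph (induced_path graph)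

-- ===== LEMMAS AND PROOFS =====

-- proof-side set-state stack machine: bridges dfsA (set + path) to loopB (path only)
def runS (g : List (Int × List Int)) : Nat → List Int → PySem.Set Int × List Int → PySem.Set Int × List Int
  | 0, _, s => s
  | _+1, [], s => s
  | f+1, node :: stack, s =>
    if node ∈ s.1 then runS g f stack s
    else runS g f (pvNbrs g node ++ stack) (PySem.Set.add s.1 node, s.2 ++ [node])

-- the universe of vertices the traversals can ever touch
def pvU (g : List (Int × List Int)) : List Int := g.map Prod.fst ++ (g.map Prod.snd).flatten
-- number of universe vertices not yet visited
def pvCnt (g : List (Int × List Int)) (vis : List Int) : Nat :=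
  ((pvU g).toFinset.filter (fun u => u ∉ vis)).card
-- fuel potential of a stack-machine state
def pvPhi (g : List (Int × List Int)) (vis stk : List Int) : Nat :=
  pvCnt g vis * (pvDeg g + 1) + stk.length
-- the stack machine run with its canonical (sufficient) fuel
def runC (g : List (Int × List Int)) (stk : List Int) (s : PySem.Set Int × List Int) :
    PySem.Set Int × List Int :=
  runS g (pvPhi g s.1 stk) stk s

lemma nbrsB_eq (g : List (Int × List Int)) (v : Int) : nbrsB g v = pvNbrs g v := by
  unfold nbrsB pvNbrs PySem.Dict.get?
  cases g.find? (fun p => p.1 == v) <;> rfl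

lemma runS_nil (g : List (Int × List Int)) (f : Nat) (s : PySem.Set Int × List Int) :
    runS g f [] s = s := by cases f <;> rfl

lemma nbrs_sub (g : List (Int × List Int)) (v : Int) {x : Int} (hx : x ∈ pvNbrs g v) :
    x ∈ pvU g := by
  unfold pvNbrs at hx
  cases h : g.find? (fun p => p.1 == v) with
  | none => rw [h] at hx; simp at hx
  | some p =>
    rw [h] at hx
    have hp : p ∈ g := List.mem_of_find?_eq_some h
    exact List.mem_append_right _ (List.mem_flatten.2 ⟨p.2, List.mem_map.2 ⟨p, hp, rfl⟩, hx⟩)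

lemma le_foldl_max (xs : List Nat) (a : Nat) : a ≤ xs.foldl max a := by
  induction xs generalizing a with
  | nil => exact le_rfl
  | cons x xs ih => exact le_trans (Nat.le_max_left a x) (ih (max a x))

lemma mem_le_foldl_max (xs : List Nat) (a x : Nat) (hx : x ∈ xs) : x ≤ xs.foldl max a := by
  induction xs generalizing a with
  | nil => cases hx
  | cons y ys ih =>
    rcases List.mem_cons.1 hx with rfl | h
    · exact le_trans (Nat.le_max_right a x) (le_foldl_max ys _)
    · exact ih _ h

lemma nbrs_len_le (g : List (Int × List Int)) (v : Int) : (pvNbrs g v).length ≤ pvDeg g := by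
  unfold pvNbrs pvDeg
  cases h : g.find? (fun p => p.1 == v) with
  | none => simp
  | some p =>
    have hp : p ∈ g := List.mem_of_find?_eq_some h
    exact mem_le_foldl_max _ 0 _ (List.mem_map.2 ⟨p, hp, rfl⟩)

lemma cnt_mono (g : List (Int × List Int)) {vis vis' : List Int}
    (h : ∀ x ∈ vis, x ∈ vis') : pvCnt g vis' ≤ pvCnt g vis := by
  apply Finset.card_le_card
  intro u hu
  simp only [Finset.mem_filter] at *
  exact ⟨hu.1, fun hv => hu.2 (h u hv)⟩

lemma cnt_pos (g : List (Int × List Int)) {vis : List Int} {v : Int}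
    (hU : v ∈ pvU g) (hv : v ∉ vis) : 0 < pvCnt g vis := by
  apply Finset.card_pos.2
  exact ⟨v, Finset.mem_filter.2 ⟨List.mem_toFinset.2 hU, by simpa using hv⟩⟩

lemma mem_add_iff (s : PySem.Set Int) (v x : Int) :
    x ∈ PySem.Set.add s v ↔ x ∈ s ∨ x = v := PySem.Set.mem_add s v x

lemma cnt_add_lt (g : List (Int × List Int)) {vis : PySem.Set Int} {v : Int}
    (hU : v ∈ pvU g) (hv : v ∉ vis) :
    pvCnt g (PySem.Set.add vis v) < pvCnt g vis := by
  apply Finset.card_lt_card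
  constructor
  · intro u hu
    simp only [Finset.mem_filter] at *
    exact ⟨hu.1, fun h => hu.2 ((mem_add_iff vis v u).2 (Or.inl h))⟩
  · intro hsub
    have hvmem : v ∈ (pvU g).toFinset.filter (fun u => u ∉ vis) :=
      Finset.mem_filter.2 ⟨List.mem_toFinset.2 hU, by simpa using hv⟩
    have := hsub hvmem
    simp only [Finset.mem_filter] at this
    exact this.2 ((mem_add_iff vis v v).2 (Or.inr rfl))

lemma foldl_pres (g : List (Int × List Int)) (f : Nat) (x : Int)
    (hstep : ∀ s n, x ∈ s.1 → x ∈ ((if n ∈ s.1 then s else dfsA g f n s) : PySem.Set Int × List Int).1) :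
    ∀ (ns : List Int) (s : PySem.Set Int × List Int), x ∈ s.1 →
      x ∈ (ns.foldl (fun s n => if n ∈ s.1 then s else dfsA g f n s) s).1 := by
  intro ns
  induction ns with
  | nil => intro s hs; exact hs
  | cons n ns ih => intro s hs; exact ih _ (hstep s n hs)

lemma visA (g : List (Int × List Int)) :
    ∀ (f : Nat) (v : Int) (s : PySem.Set Int × List Int) (x : Int),
      x ∈ s.1 → x ∈ (dfsA g f v s).1 := by
  intro f
  induction f with
  | zero => intro v s x hx; simpa [dfsA] using hx
  | succ f ih =>
    intro v s x hx
    simp only [dfsA]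
    apply foldl_pres g f x
    · intro s' n hs'
      by_cases h : n ∈ s'.1
      · simpa [h] using hs'
      · simpa [h] using ih n s' x hs'
    · exact (mem_add_iff s.1 v x).2 (Or.inl hx)

lemma phi_drop (g : List (Int × List Int)) {s : PySem.Set Int × List Int} {n : Int}
    (hU : n ∈ pvU g) (hn : n ∉ s.1) (tk : List Int) :
    pvPhi g (PySem.Set.add s.1 n) (pvNbrs g n ++ tk) + 2 ≤ pvPhi g s.1 (n :: tk) := by
  unfold pvPhi
  have h1 : pvCnt g (PySem.Set.add s.1 n) + 1 ≤ pvCnt g s.1 := cnt_add_lt g hU hn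
  have h2 := Nat.mul_le_mul_right (pvDeg g + 1) h1
  have h3 : (pvNbrs g n).length ≤ pvDeg g := nbrs_len_le g n
  rw [List.length_append, List.length_cons]
  have h4 : (pvCnt g (PySem.Set.add s.1 n) + 1) * (pvDeg g + 1)
      = pvCnt g (PySem.Set.add s.1 n) * (pvDeg g + 1) + (pvDeg g + 1) := by ring
  omega

lemma runS_stab (g : List (Int × List Int)) :
    ∀ (f : Nat) (stk : List Int) (s : PySem.Set Int × List Int),
      (∀ x ∈ stk, x ∈ pvU g) → pvPhi g s.1 stk ≤ f → runS g f stk s = runC g stk s := by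
  intro f
  induction f using Nat.strong_induction_on with
  | _ f ih =>
    intro stk s hstk hf
    cases stk with
    | nil => rw [runS_nil, runC, runS_nil]
    | cons n tk =>
      have hlen : 1 ≤ pvPhi g s.1 (n :: tk) := by unfold pvPhi; simp [List.length_cons]; omega
      obtain ⟨f', rfl⟩ : ∃ f', f = f' + 1 := ⟨f - 1, by omega⟩
      have hPhi : pvPhi g s.1 (n :: tk) = pvPhi g s.1 tk + 1 := by
        unfold pvPhi; simp only [List.length_cons]; omega
      have htk : ∀ x ∈ tk, x ∈ pvU g := fun x hx => hstk x (List.mem_cons_of_mem n hx)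
      by_cases hn : n ∈ s.1
      · rw [runC, hPhi]
        simp only [runS, if_pos hn]
        rw [ih f' (by omega) tk s htk (by omega)]
        rw [ih (pvPhi g s.1 tk) (by omega) tk s htk le_rfl]
      · have hU : n ∈ pvU g := hstk n (List.mem_cons_self)
        have hdrop : pvPhi g ((PySem.Set.add s.1 n, s.2 ++ [n]) : PySem.Set Int × List Int).1 (pvNbrs g n ++ tk) + 2 ≤ pvPhi g s.1 (n :: tk) := phi_drop g hU hn tk
        have hstk' : ∀ x ∈ pvNbrs g n ++ tk, x ∈ pvU g := by
          intro x hx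
          rcases List.mem_append.1 hx with h | h
          · exact nbrs_sub g n h
          · exact htk x h
        rw [runC, hPhi]
        simp only [runS, if_neg hn]
        rw [ih f' (by omega) _ _ hstk' (by omega)]
        rw [ih (pvPhi g s.1 tk) (by omega) _ _ hstk' (by omega)]

lemma runC_skip (g : List (Int × List Int)) {n : Int} {s : PySem.Set Int × List Int}
    (hn : n ∈ s.1) (tk : List Int) : runC g (n :: tk) s = runC g tk s := by
  have hPhi : pvPhi g s.1 (n :: tk) = pvPhi g s.1 tk + 1 := by
    unfold pvPhi; simp only [List.length_cons]; omega
  rw [runC, hPhi]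
  simp only [runS, if_pos hn]
  rfl

lemma runC_expand (g : List (Int × List Int)) {n : Int} {s : PySem.Set Int × List Int}
    (hU : n ∈ pvU g) (hn : n ∉ s.1) (tk : List Int) (htk : ∀ x ∈ tk, x ∈ pvU g) :
    runC g (n :: tk) s = runC g (pvNbrs g n ++ tk) (PySem.Set.add s.1 n, s.2 ++ [n]) := by
  have hPhi : pvPhi g s.1 (n :: tk) = pvPhi g s.1 tk + 1 := by
    unfold pvPhi; simp only [List.length_cons]; omega
  have hdrop : pvPhi g ((PySem.Set.add s.1 n, s.2 ++ [n]) : PySem.Set Int × List Int).1 (pvNbrs g n ++ tk) + 2 ≤ pvPhi g s.1 (n :: tk) := phi_drop g hU hn tk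
  have hstk' : ∀ x ∈ pvNbrs g n ++ tk, x ∈ pvU g := by
    intro x hx
    rcases List.mem_append.1 hx with h | h
    · exact nbrs_sub g n h
    · exact htk x h
  rw [runC, hPhi]
  simp only [runS, if_neg hn]
  exact runS_stab g _ _ _ hstk' (by omega)

lemma bridge (g : List (Int × List Int)) :
    ∀ (f : Nat),
      (∀ (v : Int) (st : List Int) (s : PySem.Set Int × List Int),
          v ∈ pvU g → v ∉ s.1 → (∀ x ∈ st, x ∈ pvU g) → pvCnt g s.1 ≤ f →
          runC g (v :: st) s = runC g st (dfsA g f v s)) ∧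
      (∀ (ns st : List Int) (s : PySem.Set Int × List Int),
          (∀ x ∈ ns, x ∈ pvU g) → (∀ x ∈ st, x ∈ pvU g) → pvCnt g s.1 ≤ f →
          runC g (ns ++ st) s =
            runC g st (ns.foldl (fun s n => if n ∈ s.1 then s else dfsA g f n s) s)) := by
  intro f
  induction f using Nat.strong_induction_on with
  | _ f ih =>
    have hA : ∀ (v : Int) (st : List Int) (s : PySem.Set Int × List Int),
        v ∈ pvU g → v ∉ s.1 → (∀ x ∈ st, x ∈ pvU g) → pvCnt g s.1 ≤ f →
        runC g (v :: st) s = runC g st (dfsA g f v s) := by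
      intro v st s hU hv hst hf
      have hpos : 0 < pvCnt g s.1 := cnt_pos g hU hv
      obtain ⟨f', rfl⟩ : ∃ f', f = f' + 1 := ⟨f - 1, by omega⟩
      have hcnt' : pvCnt g (PySem.Set.add s.1 v) ≤ f' := by
        have := cnt_add_lt g hU hv; omega
      rw [runC_expand g hU hv st hst]
      have hns : ∀ x ∈ pvNbrs g v, x ∈ pvU g := fun x hx => nbrs_sub g v hx
      rw [(ih f' (by omega)).2 (pvNbrs g v) st (PySem.Set.add s.1 v, s.2 ++ [v]) hns hst hcnt']
      rfl
    refine ⟨hA, ?_⟩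
    intro ns
    induction ns with
    | nil =>
      intro st s _ _ _
      rfl
    | cons n ns ihns =>
      intro st s hns hst hf
      have hns' : ∀ x ∈ ns, x ∈ pvU g := fun x hx => hns x (List.mem_cons_of_mem n hx)
      have hstU : ∀ x ∈ ns ++ st, x ∈ pvU g := by
        intro x hx
        rcases List.mem_append.1 hx with h | h
        · exact hns' x h
        · exact hst x h
      by_cases hn : n ∈ s.1
      · rw [List.cons_append, runC_skip g hn (ns ++ st), ihns st s hns' hst hf]
        simp [hn]
      · have hU : n ∈ pvU g := hns n (List.mem_cons_self)
        rw [List.cons_append, hA n (ns ++ st) s hU hn hstU hf]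
        have hsub : ∀ x ∈ s.1, x ∈ (dfsA g f n s).1 := fun x hx => visA g f n s x hx
        have hcnt2 : pvCnt g (dfsA g f n s).1 ≤ f := le_trans (cnt_mono g hsub) hf
        rw [ihns st (dfsA g f n s) hns' hst hcnt2]
        simp [hn]

lemma cnt_empty (g : List (Int × List Int)) :
    pvCnt g PySem.Set.empty = (pvU g).dedup.length := by
  unfold pvCnt
  rw [show ((pvU g).toFinset.filter (fun u => u ∉ (PySem.Set.empty : PySem.Set Int)))
      = (pvU g).toFinset by
    apply Finset.filter_true_of_mem
    intro u _
    simp [PySem.Set.empty]]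
  exact List.card_toFinset _

lemma fuel_eq (g : List (Int × List Int)) :
    pvFuel g = pvCnt g PySem.Set.empty * (pvDeg g + 1) + 1 := by
  rw [cnt_empty]; rfl

-- loopB with the path as visited structure = runS with a synchronized (set, path) state
lemma loopB_eq_runS (g : List (Int × List Int)) :
    ∀ (f : Nat) (stk : List Int) (vis : PySem.Set Int) (path : List Int),
      (∀ x : Int, x ∈ vis ↔ x ∈ path) →
      loopB g f stk path = (runS g f stk (vis, path)).2 := by
  intro f
  induction f with
  | zero => intro stk vis path _; rfl
  | succ f ih =>
    intro stk vis path hinv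
    cases stk with
    | nil => rfl
    | cons n tk =>
      simp only [loopB, runS]
      rw [if_congr (Iff.symm (hinv n)) rfl rfl]
      by_cases hn : n ∈ vis
      · rw [if_pos hn, if_pos hn]
        exact ih tk vis path hinv
      · rw [if_neg hn, if_neg hn, nbrsB_eq]
        apply ih
        intro x
        rw [mem_add_iff, hinv x]
        simp [or_comm, eq_comm]

lemma main_point (g : List (Int × List Int)) (v : Int) (hv : v ∈ g.map Prod.fst) :
    loopB g (pvFuel g) [v] [] = (dfsA g (pvFuel g) v (PySem.Set.empty, [])).2 := by
  have hU : v ∈ pvU g := List.mem_append_left _ hv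
  have hstk : ∀ x ∈ ([v] : List Int), x ∈ pvU g := by
    intro x hx; rcases List.mem_singleton.1 hx with rfl; exact hU
  have hPhi : pvPhi g (PySem.Set.empty : PySem.Set Int) [v] = pvFuel g := by
    unfold pvPhi; rw [fuel_eq]; simp
  have hcnt : pvCnt g (PySem.Set.empty : PySem.Set Int) ≤ pvFuel g := by
    rw [fuel_eq]
    have := Nat.le_mul_of_pos_right (pvCnt g PySem.Set.empty) (show 0 < pvDeg g + 1 by omega)
    omega
  have hemp : ∀ x : Int, x ∈ (PySem.Set.empty : PySem.Set Int) ↔ x ∈ ([] : List Int) := by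
    intro x; simp [PySem.Set.empty]
  rw [loopB_eq_runS g (pvFuel g) [v] PySem.Set.empty [] hemp]
  rw [runS_stab g (pvFuel g) [v] (PySem.Set.empty, []) hstk (by rw [hPhi])]
  have hnotmem : v ∉ ((PySem.Set.empty, ([] : List Int)) : PySem.Set Int × List Int).1 := by
    simp [PySem.Set.empty]
  rw [(bridge g (pvFuel g)).1 v [] (PySem.Set.empty, []) hU hnotmem (by intro x hx; cases hx) hcnt]
  rw [runC, runS_nil]

-- the running strict-comparison accumulator equals Python's max(·, key=len) over the path list
lemma max?_char : ∀ (ps : List (List Int)) (m : List Int),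
    PySem.List.max? (m :: ps) (fun p => p.length)
    = some (ps.foldl (fun b x => if b.length < x.length then x else b) m) := by
  intro ps
  induction ps with
  | nil => intro m; rfl
  | cons x ps ih =>
    intro m
    have h1 : PySem.List.max? (m :: x :: ps) (fun p : List Int => p.length)
        = PySem.List.max? ((if m.length < x.length then x else m) :: ps) (fun p => p.length) := by
      simp only [PySem.List.max?, List.foldl_cons]
      by_cases h : m.length < x.length <;> simp [h]
    rw [h1, ih]
    simp only [List.foldl_cons]

lemma foldl_map_if (F : Int → List Int) (l : List Int) (acc : List Int) :
    l.foldl (fun lp v => if lp.length < (F v).length then F v else lp) acc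
    = (l.map F).foldl (fun lp p => if lp.length < p.length then p else lp) acc := by
  induction l generalizing acc with
  | nil => rfl
  | cons v l ih => simp only [List.foldl_cons, List.map_cons]; exact ih _

lemma foldl_eq_max (ps : List (List Int)) :
    ps.foldl (fun lp p => if lp.length < p.length then p else lp) []
    = (PySem.List.max? ps (fun p => p.length)).getD [] := by
  cases ps with
  | nil => rfl
  | cons p ps =>
    rw [max?_char ps p]
    simp only [List.foldl_cons, Option.getD_some]
    have hp : (if ([] : List Int).length < p.length then p else []) = p := by
      cases p <;> simp
    rw [hp]

-- ===== VERDICT (by name: the statement is the Claim_ definition above) =====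
theorem induced_path_spec : Claim_equal_induced_path := by
  intro graph _ _
  unfold Spec_induced_path
  have hA : induced_path graph
      = (((graph.map Prod.fst).map
            (fun v => (dfsA graph (pvFuel graph) v (PySem.Set.empty, [])).2)).foldl
          (fun lp p => if lp.length < p.length then p else lp) []) := by
    rw [induced_path]
    exact foldl_map_if (fun v => (dfsA graph (pvFuel graph) v (PySem.Set.empty, [])).2)
      (graph.map Prod.fst) []
  have hmap : (graph.map Prod.fst).map (fun start => loopB graph (pvFuel graph) [start] [])
      = (graph.map Prod.fst).map
          (fun v => (dfsA graph (pvFuel graph) v (PySem.Set.empty, [])).2) := by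
    apply List.map_congr_left
    intro v hv
    exact main_point graph v hv
  have hB : induced_path_alt graph
      = (PySem.List.max? ((graph.map Prod.fst).map
            (fun v => (dfsA graph (pvFuel graph) v (PySem.Set.empty, [])).2))
          (fun p => p.length)).getD [] := by
    rw [induced_path_alt]
    show (PySem.List.max? ((graph.map Prod.fst).map
        (fun start => loopB graph (pvFuel graph) [start] [])) (fun p => p.length)).getD []
      = _
    rw [hmap]
  rw [hA, hB, foldl_eq_max]
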